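-- pv_equiv track=rewrite | github.com/olimiemma/ARC-Prize-2025-Kaggle-ARC-AGI-2-Benchmark- | arc_prize_2025_submission/versions/arc_solver_v2.py | infer_size_deltas
-- ===== SOURCE A (Python) =====
-- from typing import Any, Dict, List, Tuple, Optional
--
-- Grid = List[List[int]]
--
-- def dims(g: Grid) -> Tuple[int, int]:
--     return (len(g), len(g[0]) if g else 0)
--
-- def infer_size_deltas(train_pairs: List[Tuple[Grid, Grid]]) -> Optional[Tuple[int, int]]:
--     dh: Optional[int] = None
--     dw: Optional[int] = None
--     for src, dst in train_pairs:
--         h1, w1 = dims(src)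
--         h2, w2 = dims(dst)
--         d_h, d_w = h2 - h1, w2 - w1
--         if dh is None:
--             dh, dw = d_h, d_w
--         else:
--             if dh != d_h or dw != d_w:
--                 return None
--     return (dh or 0, dw or 0)
-- ===== SOURCE B (Python) =====
-- from typing import List, Tuple, Optional
--
-- Grid = List[List[int]]
--
-- def infer_size_deltas(train_pairs: List[Tuple[Grid, Grid]]) -> Optional[Tuple[int, int]]:
--     hs = [len(dst) - len(src) for src, dst in train_pairs]
--     ws = [(len(dst[0]) if dst else 0) - (len(src[0]) if src else 0) for src, dst in train_pairs]
--     if not train_pairs: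
--         return (0, 0)
--     if min(hs) != max(hs) or min(ws) != max(ws):
--         return None
--     return (hs[0], ws[0])
-- ===== Notes on version B (the rewrite author's own statement) =====
-- stated objective: alternative
-- what changed: B splits the task into two independent per-component passes (lists of height deltas and of width deltas) and tests constancy of each list by min == max, instead of A's single stateful loop over joint (dh,dw) Optional accumulators with early return and a final 'or 0' coercion.
import Mathlib
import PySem

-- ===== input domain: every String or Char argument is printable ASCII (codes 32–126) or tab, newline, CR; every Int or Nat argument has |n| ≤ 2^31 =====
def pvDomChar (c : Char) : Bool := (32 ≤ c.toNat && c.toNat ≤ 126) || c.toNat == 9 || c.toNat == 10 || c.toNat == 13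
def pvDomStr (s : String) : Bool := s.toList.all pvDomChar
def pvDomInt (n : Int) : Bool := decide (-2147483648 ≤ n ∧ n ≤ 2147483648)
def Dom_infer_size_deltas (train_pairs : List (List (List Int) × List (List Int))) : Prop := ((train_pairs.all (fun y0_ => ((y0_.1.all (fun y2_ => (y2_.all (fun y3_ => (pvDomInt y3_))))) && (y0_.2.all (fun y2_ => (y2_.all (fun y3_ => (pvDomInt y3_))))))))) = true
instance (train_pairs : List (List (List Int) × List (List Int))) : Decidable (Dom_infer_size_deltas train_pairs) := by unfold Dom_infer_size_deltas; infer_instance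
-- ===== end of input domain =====

-- B replaces A's single stateful loop over joint (dh,dw) Optional accumulators (early return,
-- final 'or 0') by two independent per-component lists of deltas, each tested for constancy
-- via min == max; objective: alternative decomposition, same cost.

-- ===== PORT A =====
-- dims(g) = (len(g), len(g[0]) if g else 0)
def pvDimsA (g : List (List Int)) : Int × Int :=
  ((g.length : Int), match g with | [] => 0 | r :: _ => (r.length : Int))

-- the for-loop of A, with its two Optional accumulators; the final return builds (dh or 0, dw or 0)
def pvLoopA (pairs : List (List (List Int) × List (List Int))) (dh dw : Option Int) :
    Option (Int × Int) :=
  match pairs with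
  | [] =>
      some ((match dh with | none => 0 | some x => if x = 0 then 0 else x),
            (match dw with | none => 0 | some y => if y = 0 then 0 else y))
  | (src, dst) :: rest =>
      let h1 := (pvDimsA src).1
      let w1 := (pvDimsA src).2
      let h2 := (pvDimsA dst).1
      let w2 := (pvDimsA dst).2
      let d_h := h2 - h1
      let d_w := w2 - w1
      match dh with
      | none => pvLoopA rest (some d_h) (some d_w)
      | some x => if x ≠ d_h ∨ dw ≠ some d_w then none else pvLoopA rest dh dw

def infer_size_deltas (train_pairs : List (List (List Int) × List (List Int))) :
    Option (Int × Int) :=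
  pvLoopA train_pairs none none

-- ===== PORT B =====
-- hs = [len(dst)-len(src) …]; ws = [(len(dst[0]) if dst else 0) - (len(src[0]) if src else 0) …]
def pvHs (train_pairs : List (List (List Int) × List (List Int))) : List Int :=
  train_pairs.map (fun p => (p.2.length : Int) - (p.1.length : Int))

def pvWfirst (g : List (List Int)) : Int :=
  match g with | [] => 0 | r :: _ => (r.length : Int)

def pvWs (train_pairs : List (List (List Int) × List (List Int))) : List Int :=
  train_pairs.map (fun p => pvWfirst p.2 - pvWfirst p.1)

def infer_size_deltas_alt (train_pairs : List (List (List Int) × List (List Int))) :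
    Option (Int × Int) :=
  let hs := pvHs train_pairs
  let ws := pvWs train_pairs
  match train_pairs with
  | [] => some (0, 0)
  | _ :: _ =>
      if PySem.List.min? hs (fun x => x) ≠ PySem.List.max? hs (fun x => x) ∨
         PySem.List.min? ws (fun x => x) ≠ PySem.List.max? ws (fun x => x) then none
      else
        match hs, ws with
        | h0 :: _, w0 :: _ => some (h0, w0)
        | _, _ => none   -- unreachable: train_pairs nonempty makes hs, ws nonempty

-- ===== PRECONDITION & SPEC =====
def Spec_infer_size_deltas (train_pairs : List (List (List Int) × List (List Int))) (out : Option (Int × Int)) : Prop := out = infer_size_deltas_alt train_pairs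
instance (train_pairs : List (List (List Int) × List (List Int))) (out : Option (Int × Int)) : Decidable (Spec_infer_size_deltas train_pairs out) := by unfold Spec_infer_size_deltas; infer_instance

-- ===== CLAIM (what is proved, stated in full; the proofs are below) =====
def Claim_equal_infer_size_deltas : Prop := ∀ (train_pairs : List (List (List Int) × List (List Int))), Dom_infer_size_deltas train_pairs → Spec_infer_size_deltas train_pairs (infer_size_deltas train_pairs)

-- ===== LEMMAS AND PROOFS =====

def pvDelta (p : List (List Int) × List (List Int)) : Int × Int :=
  ((pvDimsA p.2).1 - (pvDimsA p.1).1, (pvDimsA p.2).2 - (pvDimsA p.1).2)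

theorem pvLoopA_char (l : List (List (List Int) × List (List Int))) (x y : Int) :
    pvLoopA l (some x) (some y) =
      if l.all (fun p => pvDelta p = (x, y)) then some (x, y) else none := by
  induction l with
  | nil =>
      simp [pvLoopA]
      constructor <;> (intro h; exact h.symm)
  | cons p rest ih =>
      obtain ⟨src, dst⟩ := p
      simp only [pvLoopA, List.all_cons]
      by_cases hx : x = (pvDimsA dst).1 - (pvDimsA src).1
      · by_cases hy : y = (pvDimsA dst).2 - (pvDimsA src).2
        · have hc : ¬(x ≠ (pvDimsA dst).1 - (pvDimsA src).1 ∨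
              some y ≠ some ((pvDimsA dst).2 - (pvDimsA src).2)) := by simp [hx, hy]
          rw [if_neg hc, ih]
          have heq : pvDelta (src, dst) = (x, y) := by simp [pvDelta, hx, hy]
          simp only [heq, decide_true, Bool.true_and]
        · have hne : pvDelta (src, dst) ≠ (x, y) := by
            intro h
            apply hy
            have := congrArg Prod.snd h
            simpa [pvDelta] using this.symm
          rw [if_pos (Or.inr (by simpa using hy))]
          simp [hne]
      · have hne : pvDelta (src, dst) ≠ (x, y) := by
          intro h
          apply hx
          have := congrArg Prod.fst h
          simpa [pvDelta] using this.symm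
        rw [if_pos (Or.inl hx)]
        simp [hne]

-- min(a::t) = max(a::t) iff every element of t equals a
theorem min_eq_max_iff (a : Int) (t : List Int) :
    (PySem.List.min? (a :: t) (fun x => x) = PySem.List.max? (a :: t) (fun x => x)) ↔
      ∀ x ∈ t, x = a := by
  constructor
  · intro h x hx
    obtain ⟨m, hm⟩ : ∃ m, PySem.List.min? (a :: t) (fun x => x) = some m := by
      cases hmin : PySem.List.min? (a :: t) (fun x => x) with
      | none => exact absurd ((PySem.List.min?_eq_none_iff _ _).1 hmin) (by simp)
      | some m => exact ⟨m, rfl⟩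
    have hmax : PySem.List.max? (a :: t) (fun x => x) = some m := by rw [← h, hm]
    have hlo := PySem.List.min?_isMin hm
    have hhi := PySem.List.max?_isMax hmax
    have hxa : x = m := le_antisymm (hhi x (by simp [hx])) (hlo x (by simp [hx]))
    have haa : a = m := le_antisymm (hhi a (by simp)) (hlo a (by simp))
    rw [hxa, haa]
  · intro h
    have hmin : PySem.List.min? (a :: t) (fun x => x) = some a := by
      obtain ⟨m, hm⟩ : ∃ m, PySem.List.min? (a :: t) (fun x => x) = some m := by
        cases hmin : PySem.List.min? (a :: t) (fun x => x) with
        | none => exact absurd ((PySem.List.min?_eq_none_iff _ _).1 hmin) (by simp)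
        | some m => exact ⟨m, rfl⟩
      have hmem := PySem.List.min?_mem hm
      have : m = a := by
        rcases List.mem_cons.1 hmem with h1 | h1
        · exact h1
        · exact h m h1
      rw [hm, this]
    have hmax : PySem.List.max? (a :: t) (fun x => x) = some a := by
      obtain ⟨m, hm⟩ : ∃ m, PySem.List.max? (a :: t) (fun x => x) = some m := by
        cases hmax : PySem.List.max? (a :: t) (fun x => x) with
        | none => exact absurd ((PySem.List.max?_eq_none_iff _ _).1 hmax) (by simp)
        | some m => exact ⟨m, rfl⟩
      have hmem := PySem.List.max?_mem hm
      have : m = a := by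
        rcases List.mem_cons.1 hmem with h1 | h1
        · exact h1
        · exact h m h1
      rw [hm, this]
    rw [hmin, hmax]

-- ===== VERDICT (by name: the statement is the Claim_ definition above) =====
theorem infer_size_deltas_spec : Claim_equal_infer_size_deltas := by
  intro tp _
  unfold Spec_infer_size_deltas
  match tp with
  | [] => rfl
  | (src, dst) :: rest =>
      have hA : infer_size_deltas ((src, dst) :: rest) =
          pvLoopA rest (some (pvDelta (src, dst)).1) (some (pvDelta (src, dst)).2) := by
        simp [infer_size_deltas, pvLoopA, pvDelta]
      rw [hA, pvLoopA_char]
      have hhs : pvHs ((src, dst) :: rest) = (pvDelta (src, dst)).1 :: pvHs rest := by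
        simp [pvHs, pvDelta, pvDimsA]
      have hws : pvWs ((src, dst) :: rest) = (pvDelta (src, dst)).2 :: pvWs rest := by
        simp [pvWs, pvDelta, pvDimsA, pvWfirst]
      simp only [infer_size_deltas_alt, hhs, hws]
      by_cases hall : ∀ q ∈ rest, pvDelta q = pvDelta (src, dst)
      · have hminh : ∀ x ∈ pvHs rest, x = (pvDelta (src, dst)).1 := by
          intro x hx
          obtain ⟨q, hq, rfl⟩ := List.mem_map.1 hx
          have := hall q hq
          simp [pvDelta, pvDimsA] at this ⊢
          omega
        have hminw : ∀ x ∈ pvWs rest, x = (pvDelta (src, dst)).2 := by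
          intro x hx
          obtain ⟨q, hq, rfl⟩ := List.mem_map.1 hx
          have := hall q hq
          simp [pvDelta, pvDimsA, pvWfirst] at this ⊢
          omega
        have hc : ¬(PySem.List.min? ((pvDelta (src, dst)).1 :: pvHs rest) (fun x => x) ≠
              PySem.List.max? ((pvDelta (src, dst)).1 :: pvHs rest) (fun x => x) ∨
            PySem.List.min? ((pvDelta (src, dst)).2 :: pvWs rest) (fun x => x) ≠
              PySem.List.max? ((pvDelta (src, dst)).2 :: pvWs rest) (fun x => x)) := by
          push_neg
          exact ⟨(min_eq_max_iff _ _).2 hminh, (min_eq_max_iff _ _).2 hminw⟩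
        rw [if_pos (by simpa using hall), if_neg hc]
      · obtain ⟨q, hq, hne⟩ : ∃ q ∈ rest, pvDelta q ≠ pvDelta (src, dst) := by
          simpa using hall
        have hc : PySem.List.min? ((pvDelta (src, dst)).1 :: pvHs rest) (fun x => x) ≠
              PySem.List.max? ((pvDelta (src, dst)).1 :: pvHs rest) (fun x => x) ∨
            PySem.List.min? ((pvDelta (src, dst)).2 :: pvWs rest) (fun x => x) ≠
              PySem.List.max? ((pvDelta (src, dst)).2 :: pvWs rest) (fun x => x) := by
          by_contra hcc
          push_neg at hcc
          have h1 := (min_eq_max_iff _ _).1 hcc.1 (pvDelta q).1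
            (List.mem_map.2 ⟨q, hq, by simp [pvDelta, pvDimsA]⟩)
          have h2 := (min_eq_max_iff _ _).1 hcc.2 (pvDelta q).2
            (List.mem_map.2 ⟨q, hq, by simp [pvDelta, pvDimsA, pvWfirst]⟩)
          exact hne (Prod.ext h1 h2)
        rw [if_neg (by simpa using hall), if_pos hc]
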